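-- pv_equiv track=rewrite | github.com/dzedon/movies_suggestions | movies_sugg.py | fix_title
-- ===== SOURCE A (Python) =====
-- def fix_title(path):
--     words = ""
--     for char in path:
--         if char.isalnum():
--             words = words + str(char)
--         elif char == " ":
--             words = words + " "
--
--     return " ".join(words.split())
-- ===== SOURCE B (Python) =====
-- def fix_title(path):
--     tokens = path.split(" ")
--     cleaned = ["".join(c for c in t if c.isalnum()) for t in tokens]
--     return " ".join(t for t in cleaned if t)
-- ===== Notes on version B (the rewrite author's own statement) =====
-- stated objective: alternative
-- what changed: B splits the path on literal spaces first and cleans each token, joining the non-empty cleaned tokens, instead of A's flat per-character accumulation followed by split()/join whitespace normalization.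
import Mathlib
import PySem

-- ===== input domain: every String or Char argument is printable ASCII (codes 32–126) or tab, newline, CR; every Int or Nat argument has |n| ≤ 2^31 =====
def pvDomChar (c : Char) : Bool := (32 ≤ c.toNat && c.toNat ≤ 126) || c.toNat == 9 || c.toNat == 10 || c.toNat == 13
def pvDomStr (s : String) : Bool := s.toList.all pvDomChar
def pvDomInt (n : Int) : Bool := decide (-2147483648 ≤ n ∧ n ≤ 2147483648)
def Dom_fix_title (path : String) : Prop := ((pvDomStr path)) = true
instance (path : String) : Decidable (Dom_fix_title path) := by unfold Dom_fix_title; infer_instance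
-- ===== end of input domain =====

-- B splits on literal spaces and cleans each token instead of A's flat per-character
-- accumulation followed by split()/join; same return value, different decomposition.

-- ===== PORT A =====
-- words = ""; for char in path: keep alnum chars and spaces; then " ".join(words.split())
def fix_title (path : String) : String :=
  let words : List Char :=
    path.toList.foldl
      (fun w c =>
        if PySem.Chars.isalnum c then w ++ [c]
        else if c == ' ' then w ++ [' ']
        else w) []
  String.mk (PySem.Chars.join [' '] (PySem.Chars.split₀ words))

-- ===== PORT B =====
-- tokens = path.split(" "); cleaned = per-token filter of alnum chars
-- ("".join of a genexp of single chars = the filtered chars); join the non-empty ones.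
def fix_title_alt (path : String) : String :=
  let tokens := PySem.Chars.splitOn path.toList [' ']
  let cleaned := tokens.map (fun t => t.filter PySem.Chars.isalnum)
  String.mk (PySem.Chars.join [' '] (cleaned.filter (fun t => !t.isEmpty)))

-- ===== PRECONDITION & SPEC =====
def Spec_fix_title (path : String) (out : String) : Prop := out = fix_title_alt path
instance (path : String) (out : String) : Decidable (Spec_fix_title path out) := by unfold Spec_fix_title; infer_instance

-- ===== CLAIM (what is proved, stated in full; the proofs are below) =====
def Claim_equal_fix_title : Prop := ∀ (path : String), Dom_fix_title path → Spec_fix_title path (fix_title path)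

-- ===== LEMMAS AND PROOFS =====

-- the characters A's loop keeps
def pvKeep (c : Char) : Bool := PySem.Chars.isalnum c || c == ' '

theorem pv_alnum_not_space (c : Char) (h : PySem.Chars.isalnum c = true) :
    PySem.Chars.isspace c = false := by
  simp [PySem.Chars.isalnum, PySem.Chars.isalpha, PySem.Chars.isupper, PySem.Chars.islower,
        PySem.Chars.isdigit, PySem.Chars.isspace, Char.le_def,
        UInt32.le_iff_toNat_le, Char.toNat_val] at h ⊢
  omega

theorem pv_alnum_not_blank (c : Char) (h : PySem.Chars.isalnum c = true) : ¬ c = ' ' := by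
  intro hc; subst hc
  exact absurd (pv_alnum_not_space _ h) (by decide)

-- simple recursion computing splitOn on the separator [' '] (fuel removed)
def sgo : List Char → List Char → List (List Char) → List (List Char)
  | [], cur, acc => (cur.reverse :: acc).reverse
  | c :: rest, cur, acc =>
      if c == ' ' then sgo rest [] (cur.reverse :: acc) else sgo rest (c :: cur) acc

theorem splitOn_go_eq_sgo :
    ∀ (fuel : Nat) (l cur : List Char) (acc : List (List Char)), l.length < fuel →
      PySem.Chars.splitOn.go [' '] fuel l cur acc = sgo l cur acc := by
  intro fuel
  induction fuel with
  | zero => intro l cur acc h; omega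
  | succ n ih =>
    intro l cur acc h
    cases l with
    | nil => simp [PySem.Chars.splitOn.go, sgo]
    | cons c rest =>
      simp only [PySem.Chars.splitOn.go, sgo, List.isPrefixOf, List.isPrefixOf_nil_left,
                 Bool.and_true]
      by_cases hc : c = ' '
      · subst hc
        simp only [beq_self_eq_true, if_pos, List.length_cons, List.drop_succ_cons,
                   List.drop_zero]
        exact ih rest [] (cur.reverse :: acc)
          (by simp only [List.length_cons] at h; omega)
      · have hb : (' ' == c) = false := beq_false_of_ne (Ne.symm hc)
        have hb' : (c == ' ') = false := beq_false_of_ne hc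
        simp only [hb, hb', Bool.false_eq_true, if_false]
        exact ih rest (c :: cur) acc
          (by simp only [List.length_cons] at h; omega)

theorem sgo_acc : ∀ (l cur : List Char) (acc : List (List Char)),
    sgo l cur acc = acc.reverse ++ sgo l cur [] := by
  intro l
  induction l with
  | nil => intro cur acc; simp [sgo]
  | cons c rest ih =>
    intro cur acc
    by_cases hc : (c == ' ') = true
    · simp only [sgo, hc, if_pos]
      rw [ih [] (cur.reverse :: acc), ih [] [cur.reverse]]
      simp only [List.reverse_cons, List.reverse_nil, List.nil_append, List.append_assoc]
    · have hb : (c == ' ') = false := by simpa using hc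
      simp only [sgo, hb, Bool.false_eq_true, if_false]
      exact ih (c :: cur) acc

theorem split₀_go_acc : ∀ (l cur : List Char) (acc : List (List Char)),
    PySem.Chars.split₀.go l cur acc = acc.reverse ++ PySem.Chars.split₀.go l cur [] := by
  intro l
  induction l with
  | nil =>
    intro cur acc
    simp only [PySem.Chars.split₀.go]
    split_ifs <;> simp
  | cons c rest ih =>
    intro cur acc
    simp only [PySem.Chars.split₀.go]
    split_ifs with h1 h2
    · exact ih [] acc
    · rw [ih [] (cur.reverse :: acc), ih [] [cur.reverse]]
      simp
    · exact ih (c :: cur) acc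

theorem pv_main : ∀ (l curA curB : List Char),
    curA = curB.filter PySem.Chars.isalnum →
    PySem.Chars.split₀.go (l.filter pvKeep) curA [] =
      ((sgo l curB []).map (fun t => t.filter PySem.Chars.isalnum)).filter
        (fun t => !t.isEmpty) := by
  intro l
  induction l with
  | nil =>
    intro curA curB h
    simp only [List.filter_nil, PySem.Chars.split₀.go, sgo]
    have hrev : curB.reverse.filter PySem.Chars.isalnum = curA.reverse := by
      rw [h, List.filter_reverse]
    simp only [List.reverse_cons, List.reverse_nil, List.nil_append, List.map_cons,
               List.map_nil, List.filter_cons, List.filter_nil, hrev]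
    by_cases hA : curA.isEmpty
    · simp [hA, List.isEmpty_iff.mp hA]
    · have : curA ≠ [] := by simpa [List.isEmpty_iff] using hA
      simp [hA, this]
  | cons c rest ih =>
    intro curA curB h
    by_cases halnum : PySem.Chars.isalnum c = true
    · have hsp := pv_alnum_not_space c halnum
      have hne : (c == ' ') = false := by simpa using pv_alnum_not_blank c halnum
      have hkeep : pvKeep c = true := by simp [pvKeep, halnum]
      simp only [List.filter_cons, hkeep, if_pos, PySem.Chars.split₀.go, hsp,
                 Bool.false_eq_true, if_false, sgo, hne]
      exact ih (c :: curA) (c :: curB) (by simp [List.filter_cons, halnum, h])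
    · by_cases hc : c = ' '
      · subst hc
        have hkeep : pvKeep ' ' = true := by simp [pvKeep]
        simp only [List.filter_cons, hkeep, if_pos, PySem.Chars.split₀.go, sgo,
                   beq_self_eq_true, if_true]
        have hsp : PySem.Chars.isspace ' ' = true := by decide
        simp only [hsp, if_true]
        rw [sgo_acc rest [] [curB.reverse]]
        simp only [List.map_append, List.filter_append]
        have hrev : curB.reverse.filter PySem.Chars.isalnum = curA.reverse := by
          rw [h, List.filter_reverse]
        have hrest := ih [] [] rfl
        by_cases hA : curA.isEmpty
        · have hAnil : curA = [] := List.isEmpty_iff.mp hA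
          simp [hA, hAnil, hrev, hrest]
        · have hAne : curA ≠ [] := by simpa [List.isEmpty_iff] using hA
          rw [split₀_go_acc (rest.filter pvKeep) [] [curA.reverse]]
          simp [hA, hAne, hrev, hrest]
      · have hkeep : pvKeep c = false := by
          simp [pvKeep, halnum]; exact hc
        have hne : (c == ' ') = false := by simpa using hc
        simp only [List.filter_cons, hkeep, Bool.false_eq_true, if_false, sgo, hne]
        exact ih curA (c :: curB) (by simp [halnum, h])

theorem pv_words_eq (l : List Char) :
    l.foldl
      (fun w c =>
        if PySem.Chars.isalnum c then w ++ [c]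
        else if c == ' ' then w ++ [' ']
        else w) [] = l.filter pvKeep := by
  have hf : (fun (w : List Char) c =>
        if PySem.Chars.isalnum c then w ++ [c]
        else if c == ' ' then w ++ [' ']
        else w) = fun w c => if pvKeep c then w ++ [c] else w := by
    funext w c
    by_cases h1 : PySem.Chars.isalnum c = true
    · simp [pvKeep, h1]
    · by_cases h2 : (c == ' ') = true
      · have : c = ' ' := by simpa using h2
        simp [pvKeep, this]
      · simp [pvKeep, h1, h2]
  rw [hf]
  simpa using PySem.List.foldl_append_if pvKeep id l []

-- ===== VERDICT (by name: the statement is the Claim_ definition above) =====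
theorem fix_title_spec : Claim_equal_fix_title := by
  intro path _
  unfold Spec_fix_title fix_title fix_title_alt
  simp only []
  congr 1
  congr 1
  rw [pv_words_eq]
  unfold PySem.Chars.split₀ PySem.Chars.splitOn
  rw [splitOn_go_eq_sgo _ _ _ _ (by omega)]
  exact pv_main path.toList [] [] rfl
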